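-- pv_equiv track=rewrite | github.com/daiyizheng/liyi-cute | liyi_cute/processor/data_convert.py | bio_to_bioes
-- ===== SOURCE A (Python) =====
-- from typing import Optional, List, Dict, Any, Text, Tuple
--
-- def bio_to_bioes(tags: List
--                  ) -> List:
--     """
--     把bio编码转换成bioes编码
--     返回新的tags
--     :param tags:
--     :return:
--     """
--     new_tags = []
--     for i, tag in enumerate(tags):
--         if tag == 'O':
--             # 直接保留，不变化
--             new_tags.append(tag)
--         elif tag.split('-')[0] == 'B':
--             # 如果tag是以B开头，那么我们就要做下面的判断
--             # 首先，如果当前tag不是最后一个，并且紧跟着的后一个是I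
--             if (i + 1) < len(tags) and tags[i + 1].split('-')[0] == 'I':
--                 # 直接保留
--                 new_tags.append(tag)
--             else:
--                 # 如果是最后一个或者紧跟着的后一个不是I，那么表示单子，需要把B换成S表示单字
--                 new_tags.append(tag.replace('B-', 'S-'))
--         elif tag.split('-')[0] == 'I':
--             # 如果tag是以I开头，那么我们需要进行下面的判断
--             # 首先，如果当前tag不是最后一个，并且紧跟着的一个是I
--             if (i + 1) < len(tags) and tags[i + 1].split('-')[0] == 'I':
--                 # 直接保留
--                 new_tags.append(tag)
--             else:
--                 # 如果是最后一个，或者后一个不是I开头的，那么就表示一个词的结尾，就把I换成E表示一个词结尾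
--                 new_tags.append(tag.replace('I-', 'E-'))
--
--         else:
--             raise Exception('非法编码')
--     return new_tags
-- ===== SOURCE B (Python) =====
-- def bio_to_bioes(tags):
--     """Span-based rewrite: build maximal runs (a non-'O' tag plus following 'I'-prefixed
--     tags), keep every run element but the last, and convert the last by its own prefix."""
--     def prefix(t):
--         return t.split('-')[0]
--     out = []
--     rest = list(tags)
--     while rest:
--         tag = rest.pop(0)
--         if tag == 'O':
--             out.append(tag)
--         elif prefix(tag) in ('B', 'I'):
--             run = [tag]
--             while rest and prefix(rest[0]) == 'I':
--                 run.append(rest.pop(0))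
--             out.extend(run[:-1])
--             last = run[-1]
--             out.append(last.replace('B-', 'S-') if prefix(last) == 'B' else last.replace('I-', 'E-'))
--         else:
--             raise Exception('非法编码')
--     return out
-- ===== Notes on version B (the rewrite author's own statement) =====
-- stated objective: alternative
-- what changed: B builds each maximal run (a non-'O' tag plus the following 'I'-prefixed tags) first and labels by position in the run, instead of A's per-element forward lookahead at tags[i+1].
import Mathlib
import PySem

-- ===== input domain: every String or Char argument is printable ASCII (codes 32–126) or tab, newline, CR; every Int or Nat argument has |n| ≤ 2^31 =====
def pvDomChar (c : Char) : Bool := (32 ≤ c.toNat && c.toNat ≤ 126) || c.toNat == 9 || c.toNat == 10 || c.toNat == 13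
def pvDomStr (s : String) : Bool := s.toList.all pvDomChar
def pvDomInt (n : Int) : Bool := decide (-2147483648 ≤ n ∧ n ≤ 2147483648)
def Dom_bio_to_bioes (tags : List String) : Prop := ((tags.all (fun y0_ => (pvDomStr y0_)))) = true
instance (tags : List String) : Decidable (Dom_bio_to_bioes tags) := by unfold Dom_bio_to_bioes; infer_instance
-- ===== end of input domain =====

-- B replaces A's per-element forward lookahead by a span-based scan (build each maximal
-- run, copy all but its last tag, convert the last by its own prefix); objective: alternative.

-- tag.split('-')[0]  (split('-') is never empty, so [0] never raises)
def pvPrefix (t : String) : String := ((PySem.Str.split? t "-").getD []).headD ""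

-- ===== PORT A =====
-- A's for-loop over enumerate(tags): the lookahead tags[i+1] is exactly the head of the
-- list remaining after position i, so the loop is the obvious structural recursion.
def bio_A_go : List String → List String
  | [] => []
  | tag :: rest =>
    -- (i + 1) < len(tags) and tags[i + 1].split('-')[0] == 'I'
    let nextIsI : Bool := match rest with | [] => false | nxt :: _ => pvPrefix nxt == "I"
    if tag == "O" then tag :: bio_A_go rest
    else if pvPrefix tag == "B" then
      (if nextIsI then tag else PySem.Str.replace tag "B-" "S-") :: bio_A_go rest
    else if pvPrefix tag == "I" then
      (if nextIsI then tag else PySem.Str.replace tag "I-" "E-") :: bio_A_go rest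
    else []  -- raise Exception('非法编码'): excluded by Pre_bio_to_bioes

def bio_to_bioes (tags : List String) : List String := bio_A_go tags

-- ===== PORT B =====
-- the inner "while rest and prefix(rest[0]) == 'I'" loop: split off the run's tail
def pvRunSplit : List String → (List String × List String)
  | [] => ([], [])
  | t :: ts =>
    if pvPrefix t == "I" then
      let p := pvRunSplit ts
      (t :: p.1, p.2)
    else ([], t :: ts)

-- conversion of the run's last tag (the conditional expression in Source B)
def pvConvLast (t : String) : String :=
  if pvPrefix t == "B" then PySem.Str.replace t "B-" "S-" else PySem.Str.replace t "I-" "E-"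

theorem pvRunSplit_snd_length_le : ∀ ts : List String, (pvRunSplit ts).2.length ≤ ts.length := by
  intro ts
  induction ts with
  | nil => simp [pvRunSplit]
  | cons t ts ih =>
    simp only [pvRunSplit]
    split
    · simpa using Nat.le_succ_of_le ih
    · simp

-- B's outer while loop over the remaining tags; run[-1] is ported as getLastD ""
-- (the run is nonempty, so the default is never used)
def bio_alt_go : List String → List String
  | [] => []
  | tag :: rest =>
    if tag == "O" then tag :: bio_alt_go rest
    else if pvPrefix tag == "B" || pvPrefix tag == "I" then
      let p := pvRunSplit rest
      let run := tag :: p.1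
      run.dropLast ++ (pvConvLast (run.getLastD "") :: bio_alt_go p.2)
    else []  -- raise Exception('非法编码'): excluded by Pre_bio_to_bioes
  termination_by ts => ts.length
  decreasing_by
    all_goals have := pvRunSplit_snd_length_le rest
    all_goals simp
    omega

def bio_to_bioes_alt (tags : List String) : List String := bio_alt_go tags

-- ===== PRECONDITION & SPEC =====
-- Pre_ excludes exactly the inputs on which A raises Exception('非法编码'):
-- some tag that is neither 'O' nor has split('-')[0] in {'B','I'} (B raises there too).
def Pre_bio_to_bioes (tags : List String) : Prop :=
  ∀ t ∈ tags, t = "O" ∨ pvPrefix t = "B" ∨ pvPrefix t = "I"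
instance (tags : List String) : Decidable (Pre_bio_to_bioes tags) := by
  unfold Pre_bio_to_bioes; infer_instance

def pvWitness_bio_to_bioes : List String := ["B-PER", "I-PER", "O", "I-LOC", "B-ORG"]

def Spec_bio_to_bioes (tags : List String) (out : List String) : Prop := out = bio_to_bioes_alt tags
instance (tags : List String) (out : List String) : Decidable (Spec_bio_to_bioes tags out) := by
  unfold Spec_bio_to_bioes; infer_instance

-- ===== CLAIM (what is proved, stated in full; the proofs are below) =====
def Claim_equal_bio_to_bioes : Prop := ∀ (tags : List String), Dom_bio_to_bioes tags → Pre_bio_to_bioes tags → Spec_bio_to_bioes tags (bio_to_bioes tags)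

-- ===== LEMMAS AND PROOFS =====

theorem pvPrefix_O : pvPrefix "O" = "O" := by decide

theorem pvRunSplit_spec : ∀ ts : List String,
    (pvRunSplit ts).1 ++ (pvRunSplit ts).2 = ts ∧
    (∀ u ∈ (pvRunSplit ts).1, pvPrefix u = "I") ∧
    (∀ u ∈ (pvRunSplit ts).2.head?, pvPrefix u ≠ "I") := by
  intro ts
  induction ts with
  | nil => simp [pvRunSplit]
  | cons t ts ih =>
    simp only [pvRunSplit]
    split
    · next h =>
      refine ⟨by simpa using ih.1, ?_, ih.2.2⟩
      intro u hu
      rcases List.mem_cons.mp hu with rfl | hu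
      · exact beq_iff_eq.mp h
      · exact ih.2.1 u hu
    · next h =>
      refine ⟨rfl, by simp, ?_⟩
      intro u hu
      simp only [List.head?_cons, Option.mem_def, Option.some.injEq] at hu
      subst hu
      simpa using h

theorem beq_O_false {t : String} (hpt : pvPrefix t = "B" ∨ pvPrefix t = "I") :
    (t == "O") = false := by
  apply beq_eq_false_iff_ne.mpr
  intro h
  subst h
  rcases hpt with h' | h' <;> rw [pvPrefix_O] at h' <;> exact absurd h' (by decide)

-- A on a maximal run: every element but the last passes through, the last is converted.
theorem bio_A_run : ∀ (r : List String) (t : String) (rest : List String),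
    (pvPrefix t = "B" ∨ pvPrefix t = "I") →
    (∀ u ∈ r, pvPrefix u = "I") →
    (∀ u ∈ rest.head?, pvPrefix u ≠ "I") →
    bio_A_go (t :: (r ++ rest)) =
      (t :: r).dropLast ++ (pvConvLast ((t :: r).getLastD "") :: bio_A_go rest) := by
  intro r
  induction r with
  | nil =>
    intro t rest hpt _ hrest
    have htO := beq_O_false hpt
    cases rest with
    | nil =>
      rcases hpt with h' | h' <;> simp [bio_A_go, htO, h', pvConvLast]
    | cons u us =>
      have hu : (pvPrefix u == "I") = false := by
        simpa using hrest u (by simp)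
      rcases hpt with h' | h' <;> simp [bio_A_go, htO, hu, h', pvConvLast]
  | cons u r ih =>
    intro t rest hpt hr hrest
    have hpu : pvPrefix u = "I" := hr u (by simp)
    have htO := beq_O_false hpt
    have hrec := ih u rest (Or.inr hpu) (fun v hv => hr v (by simp [hv])) hrest
    have hstep : bio_A_go (t :: (u :: (r ++ rest))) = t :: bio_A_go (u :: (r ++ rest)) := by
      rcases hpt with h' | h' <;> simp [bio_A_go, htO, hpu, h']
    simp only [List.cons_append] at hstep hrec ⊢
    rw [hstep, hrec]
    simp

theorem bio_go_eq : ∀ (n : ℕ) (ts : List String), ts.length ≤ n →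
    Pre_bio_to_bioes ts → bio_A_go ts = bio_alt_go ts := by
  intro n
  induction n with
  | zero =>
    intro ts h _
    have : ts = [] := List.eq_nil_of_length_eq_zero (Nat.le_zero.mp h)
    subst this
    simp [bio_A_go, bio_alt_go]
  | succ n ih =>
    intro ts hlen hpre
    cases ts with
    | nil => simp [bio_A_go, bio_alt_go]
    | cons t rest =>
      simp only [List.length_cons] at hlen
      by_cases htO : t = "O"
      · subst htO
        have h1 : bio_A_go ("O" :: rest) = "O" :: bio_A_go rest := by simp [bio_A_go]
        have h2 : bio_alt_go ("O" :: rest) = "O" :: bio_alt_go rest := by simp [bio_alt_go]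
        rw [h1, h2, ih rest (by omega) (fun u hu => hpre u (List.mem_cons_of_mem _ hu))]
      · have hpt : pvPrefix t = "B" ∨ pvPrefix t = "I" := by
          rcases hpre t (List.mem_cons_self ..) with h | h | h
          · exact absurd h htO
          · exact Or.inl h
          · exact Or.inr h
        obtain ⟨hsplit, hrunI, hheadI⟩ := pvRunSplit_spec rest
        have hlen2 : (pvRunSplit rest).2.length ≤ n := by
          have := pvRunSplit_snd_length_le rest
          omega
        have hpre2 : Pre_bio_to_bioes (pvRunSplit rest).2 := by
          intro u hu
          exact hpre u (List.mem_cons_of_mem _ (by rw [← hsplit]; exact List.mem_append_right _ hu))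
        have hA : bio_A_go (t :: rest) =
            (t :: (pvRunSplit rest).1).dropLast ++
              (pvConvLast ((t :: (pvRunSplit rest).1).getLastD "") :: bio_A_go (pvRunSplit rest).2) := by
          conv_lhs => rw [← hsplit]
          exact bio_A_run _ t _ hpt hrunI hheadI
        have hAlt : bio_alt_go (t :: rest) =
            (t :: (pvRunSplit rest).1).dropLast ++
              (pvConvLast ((t :: (pvRunSplit rest).1).getLastD "") :: bio_alt_go (pvRunSplit rest).2) := by
          have hO := beq_O_false hpt
          have hBI : (pvPrefix t == "B" || pvPrefix t == "I") = true := by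
            rcases hpt with h | h <;> simp [h]
          simp [bio_alt_go, hO, hBI]
        rw [hA, hAlt, ih _ hlen2 hpre2]

-- ===== VERDICT (by name: the statement is the Claim_ definition above) =====
theorem bio_to_bioes_spec : Claim_equal_bio_to_bioes := by
  intro tags _ hpre
  unfold Spec_bio_to_bioes bio_to_bioes bio_to_bioes_alt
  exact bio_go_eq tags.length tags (Nat.le_refl _) hpre
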